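-- pv_equiv track=rewrite | github.com/EgypTeam/etops | extscripts/python/maven_app_inspector.py | collect_leading_annotations
-- ===== SOURCE A (Python) =====
-- from typing import Dict, List, Optional, Tuple
--
-- def collect_leading_annotations(code: str, start_idx: int) -> List[str]:
--     """
--     Collects contiguous annotations immediately preceding a declaration start index.
--     Looks backwards line-by-line until a non-annotation line is found.
--     """
--     # Find line start of declaration
--     line_start = code.rfind("\n", 0, start_idx) + 1
--     # Walk upwards
--     annotations = []
--     i = line_start - 2
--     while i >= 0:
--         # Find start of previous line
--         prev_newline = code.rfind("\n", 0, i)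
--         seg_start = 0 if prev_newline < 0 else prev_newline + 1
--         seg = code[seg_start:i + 1].strip()
--         if not seg:
--             i = prev_newline - 1
--             continue
--         if seg.startswith("@"):
--             annotations.append(seg)
--             i = prev_newline - 1
--             continue
--         # Stop when not an annotation
--         break
--     annotations.reverse()
--     return annotations
-- ===== SOURCE B (Python) =====
-- from typing import List
--
-- def collect_leading_annotations(code: str, start_idx: int) -> List[str]:
--     line_start = code.rfind("\n", 0, start_idx) + 1
--     if line_start == 0:
--         return []
--     anns: List[str] = []
--     for line in reversed(code[:line_start - 1].split("\n")):
--         s = line.strip()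
--         if not s:
--             continue
--         if s.startswith("@"):
--             anns.insert(0, s)
--         else:
--             break
--     return anns
-- ===== Notes on version B (the rewrite author's own statement) =====
-- stated objective: simpler
-- what changed: B splits the text before the declaration line once with str.split and folds over the lines in reverse, instead of A's index arithmetic that re-runs str.rfind to locate each previous line segment.
import Mathlib
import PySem

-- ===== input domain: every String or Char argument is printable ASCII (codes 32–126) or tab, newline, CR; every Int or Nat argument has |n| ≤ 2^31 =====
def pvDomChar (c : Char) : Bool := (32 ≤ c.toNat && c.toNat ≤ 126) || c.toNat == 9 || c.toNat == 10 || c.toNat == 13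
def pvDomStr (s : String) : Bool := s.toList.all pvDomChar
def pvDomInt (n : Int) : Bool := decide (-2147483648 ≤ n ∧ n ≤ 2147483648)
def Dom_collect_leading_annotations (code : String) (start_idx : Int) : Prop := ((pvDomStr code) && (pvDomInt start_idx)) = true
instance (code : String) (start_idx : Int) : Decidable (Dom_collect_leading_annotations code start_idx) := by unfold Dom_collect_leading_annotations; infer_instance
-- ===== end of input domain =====

-- B replaces A's backward index walk (a fresh str.rfind call per line) by one split of the
-- text before the declaration line and a reverse fold over the lines: simpler, same cost.

-- ===== PORT A =====
-- Bounds of str.rfind("\n", 0, e); pvLoopA's termination proof cites pvRfindBounds.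
def pvEnd (n : Nat) (e : Int) : Int :=
  if (n : Int) < e then (n : Int) else if e < 0 then (if e + n < 0 then 0 else e + n) else e

theorem pvEnd_bounds (n : Nat) (e : Int) : 0 ≤ pvEnd n e ∧ pvEnd n e ≤ n ∧ (0 ≤ e → pvEnd n e ≤ e) := by
  unfold pvEnd; split
  · omega
  · split
    · split <;> omega
    · omega

theorem pvRfindFrom_eq (s : List Char) (e : Int) :
    PySem.Chars.rfindFrom s ['\n'] 0 (some e) =
      PySem.Chars.rfind.go (List.take (pvEnd s.length e).toNat s) ['\n']
        (List.take (pvEnd s.length e).toNat s).length := by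
  unfold PySem.Chars.rfindFrom PySem.Chars.rfind
  have h0 : ¬ ((0:Int) < 0) := by omega
  simp only [if_neg h0, List.drop_zero, Int.toNat_zero]
  have he := (pvEnd_bounds s.length e).1
  unfold pvEnd at he
  rw [if_neg (by omega)]
  have hfold : (if (s.length:Int) < e then (s.length:Int) else if e < 0 then (if e + (s.length:Int) < 0 then 0 else e + (s.length:Int)) else e) = pvEnd s.length e := rfl
  rw [hfold]
  split <;> omega

theorem pvGoLower (s sub : List Char) (j : Nat) : -1 ≤ PySem.Chars.rfind.go s sub j := by
  induction j with
  | zero => unfold PySem.Chars.rfind.go; split <;> omega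
  | succ j ih => unfold PySem.Chars.rfind.go; split <;> omega

theorem pvGoUpper (s : List Char) (c : Char) (sub : List Char) (j : Nat) :
    PySem.Chars.rfind.go s (c :: sub) j < (s.length : Int) := by
  induction j with
  | zero =>
    unfold PySem.Chars.rfind.go
    split
    · rename_i h
      have hle := List.IsPrefix.length_le (List.isPrefixOf_iff_prefix.mp h)
      simp at hle; omega
    · cases s <;> simp
  | succ j ih =>
    unfold PySem.Chars.rfind.go
    split
    · rename_i h
      have hle := List.IsPrefix.length_le (List.isPrefixOf_iff_prefix.mp h)
      simp [List.length_drop] at hle ⊢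
      omega
    · exact ih

theorem pvRfindBounds (s : List Char) (e : Int) :
    -1 ≤ PySem.Chars.rfindFrom s ['\n'] 0 (some e) ∧
    PySem.Chars.rfindFrom s ['\n'] 0 (some e) < (s.length : Int) ∧
    (0 ≤ e → PySem.Chars.rfindFrom s ['\n'] 0 (some e) < e) := by
  rw [pvRfindFrom_eq]
  obtain ⟨h1, h2, h3⟩ := pvEnd_bounds s.length e
  have hlow := pvGoLower (List.take (pvEnd s.length e).toNat s) ['\n'] (List.take (pvEnd s.length e).toNat s).length
  have hup := pvGoUpper (List.take (pvEnd s.length e).toNat s) '\n' [] (List.take (pvEnd s.length e).toNat s).length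
  have hlen : (List.take (pvEnd s.length e).toNat s).length ≤ (pvEnd s.length e).toNat := by
    simp [List.length_take]
  refine ⟨hlow, by omega, fun he => by omega⟩

-- A's while loop: i walks upwards line by line via rfind; acc carries the appended annotations
def pvLoopA (cs : List Char) (i : Int) (acc : List String) : List String :=
  if i < 0 then acc.reverse
  else
    let p := PySem.Chars.rfindFrom cs ['\n'] 0 (some i)
    let segStart : Int := if p < 0 then 0 else p + 1
    let seg := PySem.Chars.strip (PySem.List.slice cs (some segStart) (some (i + 1)))
    if seg = [] then pvLoopA cs (p - 1) acc
    else if PySem.Chars.startswith seg ['@'] then pvLoopA cs (p - 1) (acc ++ [String.mk seg])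
    else acc.reverse
termination_by (i + 2).toNat
decreasing_by
  all_goals
    have h := (pvRfindBounds cs i).2.2 (by omega)
    omega

def collect_leading_annotations (code : String) (start_idx : Int) : List String :=
  let cs := code.toList
  let line_start := PySem.Chars.rfindFrom cs ['\n'] 0 (some start_idx) + 1
  pvLoopA cs (line_start - 2) []

-- ===== PORT B =====
-- B's for-loop over reversed(lines): skip blanks, prepend annotations, break otherwise
def pvLoopB (revLines : List (List Char)) (acc : List String) : List String :=
  match revLines with
  | [] => acc
  | l :: rest =>
    let s := PySem.Chars.strip l
    if s = [] then pvLoopB rest acc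
    else if PySem.Chars.startswith s ['@'] then pvLoopB rest (String.mk s :: acc)
    else acc

def collect_leading_annotations_alt (code : String) (start_idx : Int) : List String :=
  let cs := code.toList
  let line_start := PySem.Chars.rfindFrom cs ['\n'] 0 (some start_idx) + 1
  if line_start = 0 then []
  else
    pvLoopB ((PySem.Chars.splitOn (PySem.List.slice cs none (some (line_start - 1))) ['\n']).reverse) []

-- ===== PRECONDITION & SPEC =====
def Spec_collect_leading_annotations (code : String) (start_idx : Int) (out : List String) : Prop := out = collect_leading_annotations_alt code start_idx
instance (code : String) (start_idx : Int) (out : List String) : Decidable (Spec_collect_leading_annotations code start_idx out) := by unfold Spec_collect_leading_annotations; infer_instance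

-- ===== CLAIM (what is proved, stated in full; the proofs are below) =====
def Claim_equal_collect_leading_annotations : Prop := ∀ (code : String) (start_idx : Int), Dom_collect_leading_annotations code start_idx → Spec_collect_leading_annotations code start_idx (collect_leading_annotations code start_idx)

-- ===== LEMMAS AND PROOFS =====

-- reference split-on-'\n' used by the proof
def pvSplit : List Char → List (List Char)
  | [] => [[]]
  | c :: r => if c = '\n' then [] :: pvSplit r else (pvSplit r).modifyHead (c :: ·)

theorem pvSplit_ne_nil (l : List Char) : pvSplit l ≠ [] := by
  induction l with
  | nil => simp [pvSplit]
  | cons c r ih =>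
    simp only [pvSplit]
    split
    · simp
    · cases h : pvSplit r with
      | nil => exact absurd h ih
      | cons a t => simp [List.modifyHead]

theorem pvSplit_append_nl (x y : List Char) :
    pvSplit (x ++ '\n' :: y) = pvSplit x ++ pvSplit y := by
  induction x with
  | nil => simp [pvSplit]
  | cons c r ih =>
    simp only [List.cons_append, pvSplit, ih]
    split
    · simp
    · cases h : pvSplit r with
      | nil => exact absurd h (pvSplit_ne_nil r)
      | cons a t => simp [List.modifyHead]

theorem pvSplit_no_nl (y : List Char) (h : '\n' ∉ y) : pvSplit y = [y] := by
  induction y with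
  | nil => simp [pvSplit]
  | cons c r ih =>
    simp only [List.mem_cons, not_or] at h
    simp [pvSplit, Ne.symm h.1, ih h.2, List.modifyHead]

theorem pvSplitOnGo_eq (fuel : Nat) (l cur : List Char) (acc : List (List Char))
    (h : l.length < fuel) :
    PySem.Chars.splitOn.go ['\n'] fuel l cur acc =
      acc.reverse ++ (pvSplit l).modifyHead (cur.reverse ++ ·) := by
  induction fuel generalizing l cur acc with
  | zero => omega
  | succ fuel ih =>
    cases l with
    | nil =>
      unfold PySem.Chars.splitOn.go
      simp [pvSplit, List.modifyHead]
    | cons c rest =>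
      unfold PySem.Chars.splitOn.go
      by_cases hc : c = '\n'
      · subst hc
        have hpre : List.isPrefixOf ['\n'] ('\n' :: rest) = true := by
          simp [List.isPrefixOf]
        simp only [hpre, if_true]
        rw [ih _ _ _ (by simpa using Nat.lt_of_succ_lt_succ h)]
        simp only [pvSplit, if_pos rfl, List.modifyHead]
        simp only [List.reverse_cons, List.append_assoc, List.nil_append, List.singleton_append]
        cases hr : pvSplit rest with
        | nil => exact absurd hr (pvSplit_ne_nil rest)
        | cons a t => simp [hr]
      · have hpre : List.isPrefixOf ['\n'] (c :: rest) = false := by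
          simp [List.isPrefixOf]; exact fun hn => absurd hn.symm hc
        simp only [hpre, Bool.false_eq_true, if_false]
        rw [ih _ _ _ (by simpa using Nat.lt_of_succ_lt_succ h)]
        cases hr : pvSplit rest with
        | nil => exact absurd hr (pvSplit_ne_nil rest)
        | cons a t => simp [pvSplit, hc, hr, List.modifyHead]

theorem pvSplitOn_eq (s : List Char) : PySem.Chars.splitOn s ['\n'] = pvSplit s := by
  unfold PySem.Chars.splitOn
  rw [pvSplitOnGo_eq _ _ _ _ (by omega)]
  cases h : pvSplit s with
  | nil => exact absurd h (pvSplit_ne_nil s)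
  | cons a t => simp [List.modifyHead]

-- stripping ignores a trailing newline
theorem pvStrip_append_nl (z : List Char) :
    PySem.Chars.strip (z ++ ['\n']) = PySem.Chars.strip z := by
  unfold PySem.Chars.strip PySem.Chars.lstrip PySem.Chars.rstrip
  have hnl : PySem.Chars.isspace '\n' = true := by decide
  rw [List.dropWhile_append]
  by_cases h : (List.dropWhile PySem.Chars.isspace z).isEmpty
  · simp only [eq_self_iff_true, h, if_true]
    rw [List.isEmpty_iff] at h
    simp [h, hnl]
  · simp only [h, Bool.false_eq_true, if_false]
    rw [List.reverse_append]
    simp [hnl]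

theorem pvPrefixNl (l : List Char) : List.isPrefixOf ['\n'] l = true ↔ l.head? = some '\n' := by
  cases l with
  | nil => simp [List.isPrefixOf]
  | cons c r => simp [List.isPrefixOf]; exact eq_comm

theorem pvGoSpec (w : List Char) (j : Nat) :
    (PySem.Chars.rfind.go w ['\n'] j = -1 ∧ ∀ k : Nat, k ≤ j → w[k]? ≠ some '\n') ∨
    (∃ p : Nat, PySem.Chars.rfind.go w ['\n'] j = (p : Int) ∧ p ≤ j ∧ w[p]? = some '\n' ∧
      ∀ k : Nat, p < k → k ≤ j → w[k]? ≠ some '\n') := by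
  induction j with
  | zero =>
    unfold PySem.Chars.rfind.go
    by_cases h : List.isPrefixOf ['\n'] w = true
    · right
      refine ⟨0, by simp [h], le_refl 0, ?_, by omega⟩
      rw [← List.head?_drop]
      simpa using (pvPrefixNl w).mp h
    · left
      refine ⟨by simp [h], fun k hk => ?_⟩
      interval_cases k
      rw [← List.head?_drop]
      simp only [List.drop_zero] at *
      intro hc
      exact h ((pvPrefixNl w).mpr (by simpa using hc))
  | succ j ih =>
    unfold PySem.Chars.rfind.go
    by_cases h : List.isPrefixOf ['\n'] (List.drop (j+1) w) = true
    · right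
      refine ⟨j+1, by simp [h], le_refl _, ?_, by omega⟩
      rw [← List.head?_drop]
      exact (pvPrefixNl _).mp h
    · have hnot : w[j+1]? ≠ some '\n' := by
        rw [← List.head?_drop]
        intro hc
        exact h ((pvPrefixNl _).mpr hc)
      rcases ih with ⟨h1, h2⟩ | ⟨p, h1, h2, h3, h4⟩
      · left
        refine ⟨by simp [h, h1], fun k hk => ?_⟩
        rcases Nat.lt_or_ge k (j+1) with hk' | hk'
        · exact h2 k (by omega)
        · have : k = j+1 := by omega
          subst this; exact hnot
      · right
        refine ⟨p, by simp [h, h1], by omega, h3, fun k hk1 hk2 => ?_⟩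
        rcases Nat.lt_or_ge k (j+1) with hk' | hk'
        · exact h4 k hk1 (by omega)
        · have : k = j+1 := by omega
          subst this; exact hnot

-- spec of rfind("\n", 0, i) on cs for i ≤ len, via the window take i cs
theorem pvRfindSpec (cs : List Char) (i : Nat) (hi : i ≤ cs.length) :
    (0 ≤ PySem.Chars.rfindFrom cs ['\n'] 0 (some (i : Int)) →
      cs[(PySem.Chars.rfindFrom cs ['\n'] 0 (some (i : Int))).toNat]? = some '\n') ∧
    (∀ k : Nat, PySem.Chars.rfindFrom cs ['\n'] 0 (some (i : Int)) < (k : Int) → k < i →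
      cs[k]? ≠ some '\n') := by
  rw [pvRfindFrom_eq]
  have hEnd : pvEnd cs.length (i : Int) = (i : Int) := by
    unfold pvEnd; split
    · omega
    · split <;> omega
  rw [hEnd]
  have hlen : (List.take ((i:Int).toNat) cs).length = i := by
    simp [List.length_take]; omega
  have hwin : ∀ k : Nat, k < i → (List.take ((i:Int).toNat) cs)[k]? = cs[k]? := by
    intro k hk
    rw [List.getElem?_take_of_lt (by omega)]
  rcases pvGoSpec (List.take ((i:Int).toNat) cs) (List.take ((i:Int).toNat) cs).length with ⟨h1, h2⟩ | ⟨p, h1, h2, h3, h4⟩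
  · rw [h1]
    refine ⟨by omega, fun k hk1 hk2 => ?_⟩
    rw [← hwin k hk2]
    exact h2 k (by omega)
  · rw [h1]
    have hp : p < i := by
      by_contra hc
      rw [List.getElem?_eq_none (by omega)] at h3
      simp at h3
    refine ⟨fun _ => ?_, fun k hk1 hk2 => ?_⟩
    · rw [Int.toNat_natCast, ← hwin p hp]; exact h3
    · rw [← hwin k hk2]
      exact h4 k (by omega) (by omega)

-- no newline inside a drop/take window whose indices are all non-newline
theorem pvNoNlDropTake (cs : List Char) (s m : Nat)
    (h : ∀ k : Nat, s ≤ k → k < m → cs[k]? ≠ some '\n') :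
    '\n' ∉ List.drop s (List.take m cs) := by
  intro hmem
  obtain ⟨j, hj, hje⟩ := List.mem_iff_getElem.mp hmem
  have hjlen : s + j < m ∧ s + j < cs.length := by
    have := hj
    simp [List.length_drop, List.length_take] at this
    omega
  have : cs[s + j]? = some '\n' := by
    rw [List.getElem?_eq_getElem (by omega)]
    rw [← hje]
    congr 1
    rw [List.getElem_drop, List.getElem_take]
  exact h (s + j) (by omega) (by omega) this

-- B's remaining reversed-lines list when A's index is i
def pvRevLines (cs : List Char) (i : Int) : List (List Char) :=
  if -1 ≤ i then (pvSplit (List.take (i + 1).toNat cs)).reverse else []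

-- main loop invariant: A's walk at index i equals B's fold over the remaining reversed lines
theorem pvInv (cs : List Char) (n : Nat) :
    ∀ (i : Int), (i + 2).toNat ≤ n → i ≤ (cs.length : Int) - 1 → ∀ acc,
      pvLoopA cs i acc = pvLoopB (pvRevLines cs i) acc.reverse := by
  induction n with
  | zero =>
    intro i h hlen acc
    rw [pvLoopA, if_pos (by omega)]
    unfold pvRevLines
    rw [if_neg (by omega)]
    rfl
  | succ n ih =>
    intro i h hlen acc
    by_cases hneg : i < 0
    · rw [pvLoopA, if_pos hneg]
      by_cases hm1 : i = -1
      · subst hm1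
        unfold pvRevLines
        rw [if_pos (by omega)]
        norm_num
        simp [pvSplit, pvLoopB, PySem.Chars.strip, PySem.Chars.lstrip, PySem.Chars.rstrip]
      · unfold pvRevLines
        rw [if_neg (by omega)]
        rfl
    · push_neg at hneg
      set q := i.toNat with hq
      have hiq : i = (q : Int) := by omega
      have hqlen : q < cs.length := by omega
      obtain ⟨hb1, hb2, hb3⟩ := pvRfindBounds cs i
      set p := PySem.Chars.rfindFrom cs ['\n'] 0 (some i) with hp
      have hpi : p < i := hb3 (by omega)
      have hspec := pvRfindSpec cs q (le_of_lt hqlen)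
      rw [← hiq, ← hp] at hspec
      -- the segment start as a natural number
      set sN : Nat := if p < 0 then 0 else p.toNat + 1 with hsN
      have hsegStart : (if p < 0 then (0:Int) else p + 1) = (sN : Int) := by
        rw [hsN]; split <;> [rfl; push_cast] <;> omega
      have hsq : sN ≤ q := by rw [hsN]; split <;> omega
      have hspec' : ∀ k : Nat, sN ≤ k → k < q → cs[k]? ≠ some '\n' := by
        intro k hk1 hk2
        refine hspec.2 k ?_ (by omega)
        rw [hsN] at hk1; split at hk1 <;> omega
      -- the raw current-line segment
      have hseg0 : PySem.List.slice cs (some (if p < 0 then (0:Int) else p + 1)) (some (i + 1)) =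
          List.drop sN (List.take (q + 1) cs) := by
        rw [hsegStart, PySem.List.slice_toNat cs (by omega) (by omega)]
        rw [List.drop_take]
        congr 1 <;> omega
      -- decomposition of the processed prefix
      have htake : List.take (q + 1) cs =
          List.take sN cs ++ List.drop sN (List.take (q + 1) cs) := by
        conv_lhs => rw [← List.take_append_drop sN (List.take (q + 1) cs)]
        rw [List.take_take]
        congr 2
        omega
      have hpref : 0 ≤ p → List.take sN cs = List.take p.toNat cs ++ ['\n'] := by
        intro hpp
        have : sN = p.toNat + 1 := by rw [hsN]; rw [if_neg (by omega)]
        rw [this, List.take_add_one, hspec.1 hpp]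
        rfl
      -- the recursion argument: remaining lines after dropping the current one(s)
      have hihargs : ((p - 1) + 2).toNat ≤ n ∧ p - 1 ≤ (cs.length : Int) - 1 := by
        constructor <;> omega
      have hrevsub : (0 ≤ p ∧ pvRevLines cs (p - 1) = (pvSplit (List.take p.toNat cs)).reverse) ∨
          (p < 0 ∧ pvRevLines cs (p - 1) = []) := by
        by_cases hpp : 0 ≤ p
        · left
          refine ⟨hpp, ?_⟩
          unfold pvRevLines
          rw [if_pos (by omega)]
          congr 3
          omega
        · right
          refine ⟨by omega, ?_⟩
          unfold pvRevLines
          rw [if_neg (by omega)]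
      -- unfold one step of A
      rw [pvLoopA, if_neg (by omega)]
      simp only []
      rw [hseg0]
      by_cases hnlq : cs[q]? = some '\n'
      · -- the char just before the current line's terminating newline is itself a newline:
        -- A's segment carries it; B sees an extra empty line first
        have hT : List.take (q+1) cs = List.take q cs ++ ['\n'] := by
          rw [List.take_add_one, hnlq]; rfl
        have hmid : List.drop sN (List.take (q + 1) cs) = List.drop sN (List.take q cs) ++ ['\n'] := by
          rw [hT, List.drop_append_of_le_length (by simp [List.length_take]; omega)]
        have hnomid : '\n' ∉ List.drop sN (List.take q cs) := pvNoNlDropTake cs sN q hspec'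
        have hsplitT : pvSplit (List.take (q+1) cs) =
            (if 0 ≤ p then pvSplit (List.take p.toNat cs) else []) ++ [List.drop sN (List.take q cs), []] := by
          by_cases hpp : 0 ≤ p
          · rw [if_pos hpp]
            have : List.take (q+1) cs = List.take p.toNat cs ++ '\n' :: (List.drop sN (List.take q cs) ++ '\n' :: []) := by
              rw [htake, hpref hpp, hmid]
              simp
            rw [this, pvSplit_append_nl, pvSplit_append_nl, pvSplit_no_nl _ hnomid]
            simp [pvSplit]
          · rw [if_neg hpp]
            have hs0 : sN = 0 := by rw [hsN, if_pos (by omega)]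
            have : List.take (q+1) cs = List.drop sN (List.take q cs) ++ '\n' :: [] := by
              rw [hs0]
              simp only [List.drop_zero]
              rw [← hT]
            rw [this, pvSplit_append_nl, pvSplit_no_nl _ hnomid]
            simp [pvSplit]
        have hrev : pvRevLines cs i = [] :: List.drop sN (List.take q cs) :: pvRevLines cs (p - 1) := by
          rcases hrevsub with ⟨hpp, hr⟩ | ⟨hpneg, hr⟩ <;> rw [hr] <;>
            unfold pvRevLines <;> rw [if_pos (by omega)] <;>
            rw [show (i + 1).toNat = q + 1 by omega, hsplitT]
          · rw [if_pos hpp]; simp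
          · rw [if_neg (by omega)]; simp
        rw [hrev]
        rw [pvLoopB]
        have hstripnil : PySem.Chars.strip ([] : List Char) = [] := by rfl
        rw [if_pos hstripnil]
        rw [pvLoopB]
        rw [hmid, pvStrip_append_nl]
        by_cases hblank : PySem.Chars.strip (List.drop sN (List.take q cs)) = []
        · rw [if_pos hblank, if_pos hblank]
          exact ih (p - 1) hihargs.1 hihargs.2 acc
        · rw [if_neg hblank, if_neg hblank]
          by_cases hat : PySem.Chars.startswith (PySem.Chars.strip (List.drop sN (List.take q cs))) ['@'] = true
          · rw [if_pos hat, if_pos hat]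
            rw [ih (p - 1) hihargs.1 hihargs.2]
            congr 1
            simp
          · rw [if_neg hat, if_neg hat]
      · -- ordinary case: the current line carries no stray newline
        have hnoseg : '\n' ∉ List.drop sN (List.take (q+1) cs) := by
          refine pvNoNlDropTake cs sN (q+1) ?_
          intro k hk1 hk2
          by_cases hkq : k = q
          · subst hkq; exact hnlq
          · exact hspec' k hk1 (by omega)
        have hsplitT : pvSplit (List.take (q+1) cs) =
            (if 0 ≤ p then pvSplit (List.take p.toNat cs) else []) ++ [List.drop sN (List.take (q+1) cs)] := by
          by_cases hpp : 0 ≤ p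
          · rw [if_pos hpp]
            have : List.take (q+1) cs = List.take p.toNat cs ++ '\n' :: List.drop sN (List.take (q+1) cs) := by
              conv_lhs => rw [htake, hpref hpp]
              simp
            conv_lhs => rw [this]
            rw [pvSplit_append_nl, pvSplit_no_nl _ hnoseg]
          · rw [if_neg hpp]
            have hs0 : sN = 0 := by rw [hsN, if_pos (by omega)]
            rw [hs0] at hnoseg
            simp only [List.drop_zero] at hnoseg
            rw [pvSplit_no_nl _ hnoseg, hs0]
            simp
        have hrev : pvRevLines cs i = List.drop sN (List.take (q+1) cs) :: pvRevLines cs (p - 1) := by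
          rcases hrevsub with ⟨hpp, hr⟩ | ⟨hpneg, hr⟩ <;> rw [hr] <;>
            unfold pvRevLines <;> rw [if_pos (by omega)] <;>
            rw [show (i + 1).toNat = q + 1 by omega, hsplitT]
          · rw [if_pos hpp]; simp
          · rw [if_neg (by omega)]; simp
        rw [hrev]
        rw [pvLoopB]
        by_cases hblank : PySem.Chars.strip (List.drop sN (List.take (q+1) cs)) = []
        · rw [if_pos hblank, if_pos hblank]
          exact ih (p - 1) hihargs.1 hihargs.2 acc
        · rw [if_neg hblank, if_neg hblank]
          by_cases hat : PySem.Chars.startswith (PySem.Chars.strip (List.drop sN (List.take (q+1) cs))) ['@'] = true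
          · rw [if_pos hat, if_pos hat]
            rw [ih (p - 1) hihargs.1 hihargs.2]
            congr 1
            simp
          · rw [if_neg hat, if_neg hat]

-- ===== VERDICT =====
theorem collect_leading_annotations_spec : Claim_equal_collect_leading_annotations := by
  intro code start_idx _
  unfold Spec_collect_leading_annotations
  unfold collect_leading_annotations collect_leading_annotations_alt
  simp only []
  set cs := code.toList with hcs
  set p0 := PySem.Chars.rfindFrom cs ['\n'] 0 (some start_idx) with hp0
  obtain ⟨hb1, hb2, _⟩ := pvRfindBounds cs start_idx
  rw [← hp0] at hb1 hb2
  by_cases h0 : p0 + 1 = 0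
  · rw [if_pos h0]
    rw [pvLoopA]
    rw [if_pos (by omega)]
    simp
  · rw [if_neg h0]
    have hp0nn : 0 ≤ p0 := by omega
    have := pvInv cs ((p0 + 1).toNat) (p0 + 1 - 2) (by omega) (by omega) []
    rw [this]
    unfold pvRevLines
    rw [if_pos (by omega)]
    have harg : (p0 + 1 - 2 + 1).toNat = (p0 + 1 - 1).toNat := by omega
    rw [harg]
    rw [PySem.List.slice_to cs (by omega)]
    rw [pvSplitOn_eq]
    simp
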